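-- pv_equiv track=rewrite | github.com/Shilenkovv/Algorithms_PyGen_bg | 4_concept_and_analysis_of_algorithms/4_3_c.py | parse_max
-- ===== SOURCE A (Python) =====
-- def parse_max(s: str) -> int:
--     max_num = -1
--     cur_num = ''
--     s += ' '
--
--     for sym in s:
--         if sym.isdigit():
--             cur_num += sym
--         elif cur_num:
--             max_num = max(max_num, int(cur_num))
--             cur_num = ''
--
--     return max_num
-- ===== SOURCE B (Python) =====
-- import re
--
-- def parse_max(s: str) -> int:
--     return max((int(x) for x in re.findall(r'\d+', s)), default=-1)
-- ===== Notes on version B (the rewrite author's own statement) =====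
-- stated objective: idiomatic
-- what changed: Replaces the manual char loop with running max and string accumulator by a regex tokenization (re.findall of maximal digit runs) followed by a separate max-reduction with default=-1.
import Mathlib
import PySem

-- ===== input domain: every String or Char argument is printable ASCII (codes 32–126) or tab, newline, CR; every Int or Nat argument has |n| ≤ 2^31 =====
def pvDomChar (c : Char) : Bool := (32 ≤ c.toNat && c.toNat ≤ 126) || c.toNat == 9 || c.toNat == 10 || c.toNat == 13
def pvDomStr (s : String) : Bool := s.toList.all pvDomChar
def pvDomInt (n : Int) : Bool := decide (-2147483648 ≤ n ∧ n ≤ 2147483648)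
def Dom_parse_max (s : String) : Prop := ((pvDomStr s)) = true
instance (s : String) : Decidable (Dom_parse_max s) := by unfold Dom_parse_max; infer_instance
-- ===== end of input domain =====

-- B replaces A's single accumulator loop by a tokenization (maximal digit runs, as re.findall(r'\d+', s)) followed by a separate max-reduction; same behaviour, more idiomatic.

-- ===== PORT A =====
-- int(cur_num) is applied only to nonempty all-digit strings, where PySem.Int.ofChars? is always `some`; `.getD 0` is unreachable.
def parse_max (s : String) : Int :=
  (((s ++ " ").toList).foldl
    (fun st sym =>
      if PySem.Chars.isdigit sym then (st.1, st.2 ++ [sym])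
      else if st.2 ≠ [] then (max st.1 ((PySem.Int.ofChars? st.2).getD 0), ([] : List Char))
      else st)
    ((-1 : Int), ([] : List Char))).1

-- ===== PORT B =====
-- hand port of re.findall(r'\d+', s): exact — emits each maximal digit run, left to right
def digitRuns : List Char → List (List Char)
  | [] => []
  | c :: rest =>
    if PySem.Chars.isdigit c then
      (c :: rest.takeWhile PySem.Chars.isdigit) :: digitRuns (rest.dropWhile PySem.Chars.isdigit)
    else digitRuns rest
  termination_by cs => cs.length
  decreasing_by
  · have := List.length_dropWhile_le PySem.Chars.isdigit rest
    simp; omega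
  · simp

-- max((int(x) for x in runs), default=-1)
def parse_max_alt (s : String) : Int :=
  ((digitRuns s.toList).map (fun x => (PySem.Int.ofChars? x).getD 0)).foldl max (-1)

-- ===== PRECONDITION & SPEC =====
def Spec_parse_max (s : String) (out : Int) : Prop := out = parse_max_alt s
instance (s : String) (out : Int) : Decidable (Spec_parse_max s out) := by unfold Spec_parse_max; infer_instance

-- ===== CLAIM (what is proved, stated in full; the proofs are below) =====
def Claim_equal_parse_max : Prop := ∀ (s : String), Dom_parse_max s → Spec_parse_max s (parse_max s)

-- ===== LEMMAS AND PROOFS =====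

-- A's loop body, named for the proofs (definitionally the lambda in parse_max)
def stepA (st : Int × List Char) (sym : Char) : Int × List Char :=
  if PySem.Chars.isdigit sym then (st.1, st.2 ++ [sym])
  else if st.2 ≠ [] then (max st.1 ((PySem.Int.ofChars? st.2).getD 0), ([] : List Char))
  else st

def val (r : List Char) : Int := (PySem.Int.ofChars? r).getD 0

-- the runs of cs with a pending partial run cur (A's invariant shape)
def runsFrom (cur : List Char) : List Char → List (List Char)
  | [] => if cur = [] then [] else [cur]
  | c :: rest =>
    if PySem.Chars.isdigit c then runsFrom (cur ++ [c]) rest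
    else if cur = [] then runsFrom [] rest
    else cur :: runsFrom [] rest

lemma parse_max_eq (s : String) :
    parse_max s = (((s ++ " ").toList).foldl stepA ((-1 : Int), ([] : List Char))).1 := rfl

lemma loopA_eq (cs : List Char) : ∀ (m : Int) (cur : List Char),
    ((cs ++ [' ']).foldl stepA (m, cur)).1
      = ((runsFrom cur cs).map val).foldl max m := by
  induction cs with
  | nil =>
    intro m cur
    simp only [List.nil_append, List.foldl_cons, List.foldl_nil, stepA, runsFrom]
    have hsp : PySem.Chars.isdigit ' ' = false := by decide
    rw [hsp]
    by_cases h : cur = []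
    · simp [h]
    · simp [h, val]
  | cons c rest ih =>
    intro m cur
    simp only [List.cons_append, List.foldl_cons]
    by_cases hd : PySem.Chars.isdigit c
    · simp only [stepA, hd, if_pos, runsFrom]
      exact ih m (cur ++ [c])
    · by_cases hc : cur = []
      · simp only [stepA, hd, Bool.false_eq_true, ite_false, hc, ne_eq,
          not_true_eq_false, runsFrom]
        simpa [hc] using ih m ([] : List Char)
      · simp only [stepA, hd, Bool.false_eq_true, ite_false, ne_eq, hc, not_false_iff,
          if_pos, runsFrom]
        rw [show (PySem.Int.ofChars? cur).getD 0 = val cur from rfl]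
        rw [ih (max m (val cur)) []]
        simp [List.foldl_cons]

lemma runsFrom_spec (cs : List Char) :
    runsFrom [] cs = digitRuns cs ∧
    ∀ cur : List Char, cur ≠ [] →
      runsFrom cur cs
        = (cur ++ cs.takeWhile PySem.Chars.isdigit) :: digitRuns (cs.dropWhile PySem.Chars.isdigit) := by
  induction cs with
  | nil =>
    constructor
    · simp [runsFrom, digitRuns]
    · intro cur h; simp [runsFrom, h, digitRuns]
  | cons c rest ih =>
    by_cases hd : PySem.Chars.isdigit c
    · constructor
      · rw [runsFrom, if_pos hd]
        rw [show ([] : List Char) ++ [c] = [c] from rfl, ih.2 [c] (by simp), digitRuns]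
        simp [hd]
      · intro cur hcur
        rw [runsFrom, if_pos hd, ih.2 (cur ++ [c]) (by simp)]
        simp [hd]
    · constructor
      · rw [runsFrom, if_neg (by simp [hd]), if_pos rfl, ih.1, digitRuns]
        simp [hd]
      · intro cur hcur
        rw [runsFrom, if_neg (by simp [hd]), if_neg hcur, ih.1]
        simp [hd, digitRuns]

theorem parse_max_spec : Claim_equal_parse_max := by
  intro s _
  unfold Spec_parse_max
  rw [parse_max_eq]
  have h1 : (s ++ " ").toList = s.toList ++ [' '] := by simp
  rw [h1, loopA_eq s.toList (-1) [], (runsFrom_spec s.toList).1]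
  rfl
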